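-- pv_equiv track=rewrite | github.com/apassuello/crossword-helper | cli/src/fill/beam_search/evaluation/state_evaluator.py | is_gibberish_pattern
-- ===== SOURCE A (Python) =====
-- def is_gibberish_pattern(pattern: str, strict: bool = False) -> bool:
--     """
--     Check if a pattern contains obvious gibberish (repeated letters, impossible clusters).
--
--     Args:
--         pattern: Word or pattern to check (may contain '?' wildcards)
--         strict: Enable stricter checks for partial fill mode
--
--     Returns:
--         True if pattern appears to be gibberish
--
--     Examples:
--         AAAAA → True (all same letter)
--         AAA → True (all same letter)
--         NNN → True (all same letter)
--         BRNNN → True (impossible consonant cluster + repeated N)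
--         QXZJ → True (impossible bigrams in strict mode)
--         DRAMA → False (valid word pattern)
--         D?AMA → False (partial valid pattern)
--     """
--     # Remove wildcards for checking
--     letters_only = pattern.replace("?", "").upper()
--
--     if not letters_only or len(letters_only) < 3:
--         return False  # Too short to be obviously gibberish
--
--     # Check for 3+ repeated letters in a row
--     for i in range(len(letters_only) - 2):
--         if letters_only[i] == letters_only[i + 1] == letters_only[i + 2]:
--             return True  # AAA, NNN, etc.
--
--     # Check if entire pattern is same letter
--     if len(set(letters_only)) == 1:
--         return True  # AAAAA, NNN, etc.
--
--     # Check for impossible consonant clusters (4+ consonants)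
--     vowels = set("AEIOUY")
--     consonant_run = 0
--     max_consonant_run = 0
--     for char in letters_only:
--         if char not in vowels:
--             consonant_run += 1
--             max_consonant_run = max(max_consonant_run, consonant_run)
--         else:
--             consonant_run = 0
--
--     if max_consonant_run >= 4:
--         return True  # BRNNN, STRNG, etc.
--
--     # Additional strict checks for partial fill mode
--     if strict and len(letters_only) >= 2:
--         # Check for impossible bigrams
--         impossible_bigrams = [
--             "QX",
--             "QZ",
--             "QJ",
--             "QK",
--             "QV",
--             "QW",
--             "QY",
--             "JX",
--             "JZ",
--             "JQ",
--             "VX",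
--             "XZ",
--             "ZX",
--             "ZJ",
--             "VQ",
--             "VJ",
--             "WQ",
--             "WX",
--             "WZ",
--             "YQ",
--             "YZ",
--             "XQ",
--             "XJ",
--             "BQ",
--             "CQ",
--             "DQ",
--             "FQ",
--             "GQ",
--         ]
--         for i in range(len(letters_only) - 1):
--             bigram = letters_only[i : i + 2]
--             if bigram in impossible_bigrams:
--                 return True
--
--         # Check for too many rare letters
--         rare_count = sum(1 for c in letters_only if c in "JQXZ")
--         if rare_count >= 2 and len(letters_only) <= 5:
--             return True  # Short words rarely have multiple rare letters
--         if rare_count >= 3: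
--             return True  # Too many rare letters overall
--
--     return False
-- ===== SOURCE B (Python) =====
-- IMPOSSIBLE_BIGRAMS = frozenset([
--     "QX", "QZ", "QJ", "QK", "QV", "QW", "QY", "JX", "JZ", "JQ", "VX", "XZ",
--     "ZX", "ZJ", "VQ", "VJ", "WQ", "WX", "WZ", "YQ", "YZ", "XQ", "XJ", "BQ",
--     "CQ", "DQ", "FQ", "GQ",
-- ])
--
--
-- def is_gibberish_pattern(pattern: str, strict: bool = False) -> bool:
--     """Single fused state-machine pass: one traversal maintains a repeat
--     streak, a consonant-run counter, the rare-letter tally and a bigram flag,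
--     then one final expression decides; replaces A's four staged scans with
--     early returns and drops the all-same-letter set() check, which a triple
--     repeat subsumes at length >= 3."""
--     letters = pattern.replace("?", "").upper()
--     n = len(letters)
--     if n < 3:
--         return False
--     prev = None
--     rep = run = rare = 0
--     trip = cluster = bigram = False
--     for ch in letters:
--         rep = rep + 1 if ch == prev else 1
--         if rep >= 3:
--             trip = True
--         run = run + 1 if ch not in "AEIOUY" else 0
--         if run >= 4:
--             cluster = True
--         if ch in "JQXZ":
--             rare += 1
--         if prev is not None and prev + ch in IMPOSSIBLE_BIGRAMS:
--             bigram = True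
--         prev = ch
--     if trip or cluster:
--         return True
--     if strict:
--         return bigram or (rare >= 2 and n <= 5) or rare >= 3
--     return False
-- ===== Notes on version B (the rewrite author's own statement) =====
-- stated objective: alternative
-- what changed: Replaces A's four staged scans with early returns (index loop for triple repeats, set() all-same check, max-tracking consonant-run pass, separate bigram index loop and rare-letter generator) by one fused state-machine traversal that maintains a repeat streak, a consonant-run counter, a rare-letter tally and a bigram flag in a single accumulator, deciding once at the end; the all-same-letter check is dropped as subsumed by the triple-repeat flag at length >= 3.
import Mathlib
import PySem

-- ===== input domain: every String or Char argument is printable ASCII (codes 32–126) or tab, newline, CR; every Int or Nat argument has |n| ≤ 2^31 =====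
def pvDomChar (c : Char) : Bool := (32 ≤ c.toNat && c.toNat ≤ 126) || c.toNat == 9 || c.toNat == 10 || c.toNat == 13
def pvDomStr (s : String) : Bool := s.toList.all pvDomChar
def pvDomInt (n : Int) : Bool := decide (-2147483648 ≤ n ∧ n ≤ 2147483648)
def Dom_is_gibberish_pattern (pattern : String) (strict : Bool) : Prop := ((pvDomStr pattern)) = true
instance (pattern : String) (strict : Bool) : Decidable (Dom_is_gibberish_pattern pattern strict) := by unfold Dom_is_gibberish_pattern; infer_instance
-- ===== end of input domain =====

-- B fuses A's staged scans into a single state-machine pass over the letters and drops the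
-- redundant all-same-letter set() check (objective: alternative decomposition; no speed claim).

-- ===== PORT A =====
-- the 28 impossible bigrams, as 2-char lists (Python list of 2-char strings)
def pvBigramsA : List (List Char) :=
  ["QX".toList, "QZ".toList, "QJ".toList, "QK".toList, "QV".toList, "QW".toList,
   "QY".toList, "JX".toList, "JZ".toList, "JQ".toList, "VX".toList, "XZ".toList,
   "ZX".toList, "ZJ".toList, "VQ".toList, "VJ".toList, "WQ".toList, "WX".toList,
   "WZ".toList, "YQ".toList, "YZ".toList, "XQ".toList, "XJ".toList, "BQ".toList,
   "CQ".toList, "DQ".toList, "FQ".toList, "GQ".toList]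

def is_gibberish_pattern (pattern : String) (strict : Bool) : Bool :=
  let t : List Char := (PySem.Str.upper (PySem.Str.replace pattern "?" "")).toList
  if t.isEmpty || decide (t.length < 3) then false
  else if (PySem.List.pyRange 0 ((t.length : Int) - 2) 1).any (fun i =>
      (PySem.List.pyGet? t i == PySem.List.pyGet? t (i + 1)) &&
      (PySem.List.pyGet? t (i + 1) == PySem.List.pyGet? t (i + 2))) then true
  else if (PySem.Set.ofList t).length == 1 then true
  else
    let vowels : PySem.Set Char := PySem.Set.ofList "AEIOUY".toList
    let p : Int × Int := t.foldl (fun st c =>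
        if !(PySem.Set.contains vowels c) then (st.1 + 1, max st.2 (st.1 + 1))
        else (0, st.2)) (0, 0)
    if decide (4 ≤ p.2) then true
    else if strict && decide (2 ≤ t.length) then
      if (PySem.List.pyRange 0 ((t.length : Int) - 1) 1).any (fun i =>
          pvBigramsA.contains (PySem.List.slice t (some i) (some (i + 2)))) then true
      else
        let rare : Int := (t.map (fun c => if "JQXZ".toList.contains c then (1 : Int) else 0)).sum
        if decide (2 ≤ rare) && decide (t.length ≤ 5) then true
        else if decide (3 ≤ rare) then true
        else false
    else false

-- ===== PORT B =====
-- Python B's module-level frozenset IMPOSSIBLE_BIGRAMS (same 28 bigrams, as a set)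
def pvBigramsB : PySem.Set (List Char) := PySem.Set.ofList pvBigramsA

-- the loop body of B's single pass; state = (prev, rep, run, rare, trip, cluster, bigram)
def pvStep (s : Option Char × Int × Int × Int × Bool × Bool × Bool) (c : Char) :
    Option Char × Int × Int × Int × Bool × Bool × Bool :=
  let rep : Int := if s.1 == some c then s.2.1 + 1 else 1
  let trip : Bool := s.2.2.2.2.1 || decide (3 ≤ rep)
  let run : Int := if !("AEIOUY".toList.contains c) then s.2.2.1 + 1 else 0
  let cluster : Bool := s.2.2.2.2.2.1 || decide (4 ≤ run)
  let rare : Int := if "JQXZ".toList.contains c then s.2.2.2.1 + 1 else s.2.2.2.1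
  let bigram : Bool := s.2.2.2.2.2.2 ||
    (match s.1 with
     | some p => PySem.Set.contains pvBigramsB [p, c]
     | none => false)
  (some c, rep, run, rare, trip, cluster, bigram)

def is_gibberish_pattern_alt (pattern : String) (strict : Bool) : Bool :=
  let t : List Char := (PySem.Str.upper (PySem.Str.replace pattern "?" "")).toList
  if decide (t.length < 3) then false
  else
    let s := t.foldl pvStep (none, 0, 0, 0, false, false, false)
    if s.2.2.2.2.1 || s.2.2.2.2.2.1 then true
    else if strict then
      s.2.2.2.2.2.2 || (decide (2 ≤ s.2.2.2.1) && decide (t.length ≤ 5)) ||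
        decide (3 ≤ s.2.2.2.1)
    else false

-- ===== PRECONDITION & SPEC =====
def Spec_is_gibberish_pattern (pattern : String) (strict : Bool) (out : Bool) : Prop := out = is_gibberish_pattern_alt pattern strict
instance (pattern : String) (strict : Bool) (out : Bool) : Decidable (Spec_is_gibberish_pattern pattern strict out) := by unfold Spec_is_gibberish_pattern; infer_instance

-- ===== CLAIM (what is proved, stated in full; the proofs are below) =====
def Claim_equal_is_gibberish_pattern : Prop := ∀ (pattern : String) (strict : Bool), Dom_is_gibberish_pattern pattern strict → Spec_is_gibberish_pattern pattern strict (is_gibberish_pattern pattern strict)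

-- ===== LEMMAS AND PROOFS =====

def pvCons (c : Char) : Bool := !("AEIOUY".toList.contains c)

def pvTrip : List Char → Bool
  | a :: b :: c :: r => (a == b && b == c) || pvTrip (b :: c :: r)
  | _ => false

def pvQuad : List Char → Bool
  | a :: b :: c :: d :: r =>
      (pvCons a && pvCons b && pvCons c && pvCons d) || pvQuad (b :: c :: d :: r)
  | _ => false

def pvLead : List Char → Nat
  | [] => 0
  | c :: t => if pvCons c then pvLead t + 1 else 0

def pvBig : List Char → Bool
  | a :: b :: r => pvBigramsA.contains [a, b] || pvBig (b :: r)
  | _ => false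

-- state-machine views of the four checks
def pvTripSt (p : Option Char) (k : Int) : List Char → Bool
  | [] => false
  | c :: r =>
      let k' : Int := if p == some c then k + 1 else 1
      decide (3 ≤ k') || pvTripSt (some c) k' r

def pvCluSt (k : Int) : List Char → Bool
  | [] => false
  | c :: r =>
      let k' : Int := if pvCons c then k + 1 else 0
      decide (4 ≤ k') || pvCluSt k' r

def pvBigSt (p : Option Char) : List Char → Bool
  | [] => false
  | c :: r =>
      (match p with
       | some q => PySem.Set.contains pvBigramsB [q, c]
       | none => false) || pvBigSt (some c) r

-- ---- projections of B's fused fold ----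

theorem pv_proj_trip : ∀ (t : List Char) (s : Option Char × Int × Int × Int × Bool × Bool × Bool),
    (t.foldl pvStep s).2.2.2.2.1 = (s.2.2.2.2.1 || pvTripSt s.1 s.2.1 t) := by
  intro t
  induction t with
  | nil => intro s; simp [pvTripSt]
  | cons c r ih =>
    intro s
    rw [List.foldl_cons, ih]
    simp only [pvStep, pvTripSt]
    rw [Bool.or_assoc]

theorem pv_proj_clu : ∀ (t : List Char) (s : Option Char × Int × Int × Int × Bool × Bool × Bool),
    (t.foldl pvStep s).2.2.2.2.2.1 = (s.2.2.2.2.2.1 || pvCluSt s.2.2.1 t) := by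
  intro t
  induction t with
  | nil => intro s; simp [pvCluSt]
  | cons c r ih =>
    intro s
    rw [List.foldl_cons, ih]
    simp only [pvStep, pvCluSt, pvCons]
    rw [Bool.or_assoc]
    rfl


theorem pv_proj_rare : ∀ (t : List Char) (s : Option Char × Int × Int × Int × Bool × Bool × Bool),
    (t.foldl pvStep s).2.2.2.1 =
      s.2.2.2.1 + (t.map (fun c => if "JQXZ".toList.contains c then (1 : Int) else 0)).sum := by
  intro t
  induction t with
  | nil => intro s; simp
  | cons c r ih =>
    intro s
    rw [List.foldl_cons, ih]
    simp only [pvStep, List.map_cons, List.sum_cons]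
    split_ifs <;> ring

theorem pv_proj_big : ∀ (t : List Char) (s : Option Char × Int × Int × Int × Bool × Bool × Bool),
    (t.foldl pvStep s).2.2.2.2.2.2 = (s.2.2.2.2.2.2 || pvBigSt s.1 t) := by
  intro t
  induction t with
  | nil => intro s; simp [pvBigSt]
  | cons c r ih =>
    intro s
    rw [List.foldl_cons, ih]
    simp only [pvStep, pvBigSt]
    rw [Bool.or_assoc]

-- ---- the state-machine views equal the window predicates ----

theorem pv_trip_cons_ne (p c : Char) (r : List Char) (h : (p == c) = false) :
    pvTrip (p :: c :: r) = pvTrip (c :: r) := by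
  cases r with
  | nil => rfl
  | cons d r' => simp [pvTrip, h]

theorem pv_tripst_one : ∀ (t : List Char) (p : Char),
    (pvTripSt (some p) 1 t = pvTrip (p :: t)) ∧
    (pvTripSt (some p) 2 t = pvTrip (p :: p :: t)) := by
  intro t
  induction t with
  | nil =>
    intro p
    constructor <;> rfl
  | cons c r ih =>
    intro p
    by_cases h : p = c
    · subst h
      constructor
      · have h2 := (ih p).2
        simp only [pvTripSt, beq_self_eq_true, if_true]
        norm_num
        exact h2
      · simp only [pvTripSt, beq_self_eq_true, if_true]
        norm_num
        simp [pvTrip]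
    · have hb : (some p == some c) = false := by simp [h]
      have hbc : (p == c) = false := by simp [h]
      constructor
      · have h1 := (ih c).1
        simp only [pvTripSt, hb, Bool.false_eq_true, if_false]
        norm_num
        rw [h1, pv_trip_cons_ne p c r hbc]
      · have h1 := (ih c).1
        simp only [pvTripSt, hb, Bool.false_eq_true, if_false]
        norm_num
        rw [h1]
        have h2 : pvTrip (p :: p :: c :: r) = pvTrip (p :: c :: r) := by simp [pvTrip, hbc]
        rw [h2, pv_trip_cons_ne p c r hbc]

theorem pv_tripst_zero : ∀ t : List Char, pvTripSt none 0 t = pvTrip t := by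
  intro t
  cases t with
  | nil => rfl
  | cons c r =>
    have hb : ((none : Option Char) == some c) = false := by simp
    simp only [pvTripSt, hb, Bool.false_eq_true, if_false]
    norm_num
    exact (pv_tripst_one r c).1

theorem pv_lead4_quad : ∀ t : List Char, 4 ≤ pvLead t → pvQuad t = true := by
  intro t h
  match t with
  | [] => simp [pvLead] at h
  | [a] => simp only [pvLead] at h; split_ifs at h <;> omega
  | [a, b] => simp only [pvLead] at h; split_ifs at h <;> omega
  | [a, b, c] => simp only [pvLead] at h; split_ifs at h <;> omega
  | a :: b :: c :: d :: r =>
    simp only [pvLead] at h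
    split_ifs at h <;> simp_all [pvQuad]

theorem pv_quad_cons_cons (c : Char) (tl : List Char) (hc : pvCons c = true) :
    pvQuad (c :: tl) = (decide (3 ≤ pvLead tl) || pvQuad tl) := by
  match tl with
  | [] => simp [pvQuad, pvLead]
  | [b] =>
    by_cases hb : pvCons b <;> simp [pvQuad, pvLead, hb]
  | [b, d] =>
    by_cases hb : pvCons b <;> by_cases hd : pvCons d <;> simp [pvQuad, pvLead, hb, hd]
  | b :: d :: e :: r =>
    by_cases hb : pvCons b <;> by_cases hd : pvCons d <;> by_cases he : pvCons e <;>
      simp [pvQuad, pvLead, hc, hb, hd, he]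

theorem pv_quad_cons_vowel (c : Char) (tl : List Char) (hc : pvCons c = false) :
    pvQuad (c :: tl) = pvQuad tl := by
  match tl with
  | [] => simp [pvQuad]
  | [b] => simp [pvQuad]
  | [b, d] => simp [pvQuad]
  | b :: d :: e :: r => simp [pvQuad, hc]

theorem pv_clust_iff : ∀ (t : List Char) (k : Int), 0 ≤ k → k ≤ 3 →
    (pvCluSt k t = true ↔ 4 ≤ k + (pvLead t : Int) ∨ pvQuad t = true) := by
  intro t
  induction t with
  | nil =>
    intro k h0 h3
    simp only [pvCluSt, pvLead, pvQuad]
    constructor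
    · intro h; exact absurd h (by simp)
    · rintro (h | h)
      · push_cast at h; omega
      · simp at h
  | cons c r ih =>
    intro k h0 h3
    by_cases hc : pvCons c = true
    · simp only [pvCluSt, hc, if_true, Bool.or_eq_true, decide_eq_true_eq]
      rw [pv_quad_cons_cons c r hc]
      simp only [pvLead, hc, if_true, Bool.or_eq_true, decide_eq_true_eq]
      by_cases hk : k = 3
      · subst hk
        constructor
        · intro _; left; push_cast; omega
        · intro _; left; omega
      · rw [ih (k + 1) (by omega) (by omega)]
        constructor
        · rintro (h | h | h)
          · exact absurd (by omega : k = 3) hk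
          · left; push_cast at h ⊢; omega
          · right; right; exact h
        · rintro (h | h | h)
          · right; left; push_cast at h ⊢; omega
          · right; left; omega
          · right; right; exact h
    · have hc' : pvCons c = false := by simpa using hc
      simp only [pvCluSt, hc', Bool.false_eq_true, if_false, Bool.or_eq_true, decide_eq_true_eq]
      rw [pv_quad_cons_vowel c r hc', ih 0 le_rfl (by omega)]
      simp only [pvLead, hc', Bool.false_eq_true, if_false]
      constructor
      · rintro (h | h | h)
        · omega
        · right; exact pv_lead4_quad r (by omega)
        · right; exact h
      · rintro (h | h)
        · push_cast at h; omega
        · right; right; exact h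

theorem pv_clust_zero : ∀ t : List Char, pvCluSt 0 t = pvQuad t := by
  intro t
  have h := pv_clust_iff t 0 le_rfl (by omega)
  simp only [zero_add] at h
  cases hq : pvQuad t
  · have : ¬ (pvCluSt 0 t = true) := by
      rw [h]
      rintro (h4 | h4)
      · exact absurd (pv_lead4_quad t (by exact_mod_cast h4)) (by simp [hq])
      · simp [hq] at h4
    simpa using this
  · rw [h.2 (Or.inr hq)]

theorem pv_bigst_some : ∀ (t : List Char) (p : Char),
    pvBigSt (some p) t = pvBig (p :: t) := by
  intro t
  induction t with
  | nil => intro p; rfl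
  | cons c r ih =>
    intro p
    simp only [pvBigSt, pvBig, ih c]
    have hBB : ∀ x : List Char, PySem.Set.contains pvBigramsB x = pvBigramsA.contains x := by
      intro x
      have : pvBigramsB = pvBigramsA := by decide
      rw [this]
      rfl
    rw [hBB]

theorem pv_bigst_none : ∀ t : List Char, pvBigSt none t = pvBig t := by
  intro t
  cases t with
  | nil => rfl
  | cons c r =>
    simp only [pvBigSt]
    rw [pv_bigst_some r c]
    simp

-- ---- A-side loop characterizations ----

theorem pv_get_shift (a : Char) (tl : List Char) (i : Int) (h : 0 ≤ i) :
    PySem.List.pyGet? (a :: tl) (i + 1) = PySem.List.pyGet? tl i := by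
  obtain ⟨n, rfl⟩ := Int.eq_ofNat_of_zero_le h
  have e : ((n : Int) + 1) = ((n + 1 : Nat) : Int) := by push_cast; ring
  rw [e, PySem.List.pyGet?_natCast, PySem.List.pyGet?_natCast]
  simp

theorem pv_tripN : ∀ t : List Char,
    ((List.range (t.length - 2)).any (fun k =>
      (PySem.List.pyGet? t (k : Int) == PySem.List.pyGet? t ((k : Int) + 1)) &&
      (PySem.List.pyGet? t ((k : Int) + 1) == PySem.List.pyGet? t ((k : Int) + 2)))) = pvTrip t := by
  intro t
  induction t with
  | nil => rfl
  | cons a tl ih =>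
    cases tl with
    | nil => rfl
    | cons b tl2 =>
      cases tl2 with
      | nil => rfl
      | cons c r =>
        have hlen : (a :: b :: c :: r : List Char).length - 2 = (r.length + 1) := by simp
        have hlen2 : (b :: c :: r : List Char).length - 2 = r.length := by simp
        have hhead : ((PySem.List.pyGet? (a :: b :: c :: r) ((0 : Nat) : Int) ==
              PySem.List.pyGet? (a :: b :: c :: r) (((0 : Nat) : Int) + 1)) &&
            (PySem.List.pyGet? (a :: b :: c :: r) (((0 : Nat) : Int) + 1) ==
              PySem.List.pyGet? (a :: b :: c :: r) (((0 : Nat) : Int) + 2))) = (a == b && b == c) := by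
          have h1 : (0:Int) ≤ (r.length:Int) + 1 + 1 := by positivity
          have h2 : (0:Int) ≤ (r.length:Int) + 1 := by positivity
          have h3 : (2:Int) ≤ (r.length:Int) + 1 + 1 := by omega
          simp [PySem.List.pyGet?, PySem.List.pyIdx?, h1, h2, h3]
        rw [hlen2] at ih
        rw [hlen, List.range_succ_eq_map, List.any_cons, List.any_map, pvTrip, hhead]
        have hfun : ∀ k : Nat,
            ((fun k : Nat =>
              (PySem.List.pyGet? (a :: b :: c :: r) (k : Int) == PySem.List.pyGet? (a :: b :: c :: r) ((k : Int) + 1)) &&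
              (PySem.List.pyGet? (a :: b :: c :: r) ((k : Int) + 1) == PySem.List.pyGet? (a :: b :: c :: r) ((k : Int) + 2))) ∘ Nat.succ) k =
            ((PySem.List.pyGet? (b :: c :: r) (k : Int) == PySem.List.pyGet? (b :: c :: r) ((k : Int) + 1)) &&
              (PySem.List.pyGet? (b :: c :: r) ((k : Int) + 1) == PySem.List.pyGet? (b :: c :: r) ((k : Int) + 2))) := by
          intro k
          simp only [Function.comp_apply, Nat.succ_eq_add_one]
          have e1 : ((k + 1 : Nat) : Int) = (k : Int) + 1 := by push_cast; ring
          have e2 : ((k : Int) + 1 + 2) = ((k : Int) + 2) + 1 := by ring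
          simp only [e1, e2]
          rw [pv_get_shift a _ (k : Int) (by positivity),
              pv_get_shift a _ ((k : Int) + 1) (by positivity),
              pv_get_shift a _ ((k : Int) + 2) (by positivity)]
        rw [List.any_congr rfl hfun, ih]

theorem pv_bigN : ∀ t : List Char,
    ((List.range (t.length - 1)).any (fun k =>
      pvBigramsA.contains ((t.drop k).take 2))) = pvBig t := by
  intro t
  induction t with
  | nil => rfl
  | cons a tl ih =>
    cases tl with
    | nil => rfl
    | cons b r =>
      have hlen : (a :: b :: r : List Char).length - 1 = r.length + 1 := by simp
      have hlen2 : (b :: r : List Char).length - 1 = r.length := by simp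
      rw [hlen2] at ih
      rw [hlen, List.range_succ_eq_map, List.any_cons, List.any_map, pvBig]
      have hfun : ∀ k : Nat,
          ((fun k : Nat => pvBigramsA.contains (((a :: b :: r).drop k).take 2)) ∘ Nat.succ) k =
          (fun k : Nat => pvBigramsA.contains (((b :: r).drop k).take 2)) k := by
        intro k
        simp [Function.comp_apply]
      rw [List.any_congr rfl hfun, ih]
      simp

theorem pv_allsame (t : List Char) (h3 : 3 ≤ t.length)
    (h1 : (PySem.Set.ofList t).length = 1) : pvTrip t = true := by
  have hx : ∃ x, PySem.Set.ofList t = [x] := by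
    cases h : PySem.Set.ofList t with
    | nil => rw [h] at h1; simp at h1
    | cons x rest =>
      cases rest with
      | nil => exact ⟨x, rfl⟩
      | cons y r2 => rw [h] at h1; simp at h1
  obtain ⟨x, hx⟩ := hx
  have hall : ∀ y ∈ t, y = x := by
    intro y hy
    have : y ∈ PySem.Set.ofList t := (PySem.Set.mem_ofList t y).2 hy
    rw [hx] at this
    simpa using this
  match t, h3 with
  | a :: b :: c :: r, _ =>
    have ha := hall a (by simp)
    have hb := hall b (by simp)
    have hc := hall c (by simp)
    subst ha hb hc
    simp [pvTrip]

theorem pv_quad_run : ∀ (t : List Char) (run maxr : Int), 0 ≤ run → run ≤ maxr →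
    (4 ≤ (t.foldl (fun st c =>
        if pvCons c then (st.1 + 1, max st.2 (st.1 + 1)) else ((0 : Int), st.2))
        (run, maxr)).2 ↔
      4 ≤ maxr ∨ 4 ≤ run + (pvLead t : Int) ∨ pvQuad t = true) := by
  intro t
  induction t with
  | nil =>
    intro run maxr h1 h2
    simp only [List.foldl_nil, pvLead, pvQuad]
    constructor
    · intro h; exact Or.inl h
    · rintro (h | h | h)
      · exact h
      · push_cast at h; omega
      · simp at h
  | cons c tl ih =>
    intro run maxr h1 h2
    by_cases hc : pvCons c
    · rw [List.foldl_cons]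
      simp only [hc, if_true]
      rw [ih (run + 1) (max maxr (run + 1)) (by omega) (le_max_right _ _)]
      rw [pv_quad_cons_cons c tl hc]
      simp only [pvLead, hc, if_true]
      constructor
      · rintro (h | h | h)
        · rcases le_max_iff.1 h with h' | h'
          · exact Or.inl h'
          · right; left; omega
        · right; left; push_cast at h ⊢; omega
        · right; right; simp [h]
      · rintro (h | h | h)
        · exact Or.inl (le_max_of_le_left h)
        · right; left; push_cast at h ⊢; omega
        · simp only [Bool.or_eq_true, decide_eq_true_eq] at h
          rcases h with h | h
          · right; left; omega
          · right; right; simp [h]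
    · have hc' : pvCons c = false := by simpa using hc
      rw [List.foldl_cons]
      simp only [hc', Bool.false_eq_true, if_false]
      rw [ih 0 maxr le_rfl (by omega)]
      rw [pv_quad_cons_vowel c tl hc']
      simp only [pvLead, hc', Bool.false_eq_true, if_false]
      constructor
      · rintro (h | h | h)
        · exact Or.inl h
        · right; right; exact pv_lead4_quad tl (by omega)
        · right; right; exact h
      · rintro (h | h | h)
        · exact Or.inl h
        · left; omega
        · right; right; exact h

theorem pv_any_pyRange_zero (m : Int) (f : Int → Bool) :
    (PySem.List.pyRange 0 m 1).any f = (List.range m.toNat).any (fun k => f (k : Int)) := by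
  rw [PySem.List.pyRange_one, List.any_map]
  simp
  rfl

set_option maxHeartbeats 1000000 in
theorem pv_main (t : List Char) (strict : Bool) :
    (if t.isEmpty || decide (t.length < 3) then false
     else if (PySem.List.pyRange 0 ((t.length : Int) - 2) 1).any (fun i =>
         (PySem.List.pyGet? t i == PySem.List.pyGet? t (i + 1)) &&
         (PySem.List.pyGet? t (i + 1) == PySem.List.pyGet? t (i + 2))) then true
     else if (PySem.Set.ofList t).length == 1 then true
     else
       let vowels : PySem.Set Char := PySem.Set.ofList "AEIOUY".toList
       let p : Int × Int := t.foldl (fun st c =>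
           if !(PySem.Set.contains vowels c) then (st.1 + 1, max st.2 (st.1 + 1))
           else (0, st.2)) (0, 0)
       if decide (4 ≤ p.2) then true
       else if strict && decide (2 ≤ t.length) then
         if (PySem.List.pyRange 0 ((t.length : Int) - 1) 1).any (fun i =>
             pvBigramsA.contains (PySem.List.slice t (some i) (some (i + 2)))) then true
         else
           let rare : Int := (t.map (fun c => if "JQXZ".toList.contains c then (1 : Int) else 0)).sum
           if decide (2 ≤ rare) && decide (t.length ≤ 5) then true
           else if decide (3 ≤ rare) then true
           else false
       else false) =
    (if decide (t.length < 3) then false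
     else
       let s := t.foldl pvStep (none, 0, 0, 0, false, false, false)
       if s.2.2.2.2.1 || s.2.2.2.2.2.1 then true
       else if strict then
         s.2.2.2.2.2.2 || (decide (2 ≤ s.2.2.2.1) && decide (t.length ≤ 5)) ||
           decide (3 ≤ s.2.2.2.1)
       else false) := by
  by_cases h3 : t.length < 3
  · simp [h3]
  · have h3' : 3 ≤ t.length := by omega
    have hne : t.isEmpty = false := by
      cases t
      · simp at h3'
      · simp
    -- B-side fold projections
    have htripB : (t.foldl pvStep (none, 0, 0, 0, false, false, false)).2.2.2.2.1 = pvTrip t := by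
      rw [pv_proj_trip]
      simp only [Bool.false_or]
      exact pv_tripst_zero t
    have hcluB : (t.foldl pvStep (none, 0, 0, 0, false, false, false)).2.2.2.2.2.1 = pvQuad t := by
      rw [pv_proj_clu]
      simp only [Bool.false_or]
      exact pv_clust_zero t
    have hbigB : (t.foldl pvStep (none, 0, 0, 0, false, false, false)).2.2.2.2.2.2 = pvBig t := by
      rw [pv_proj_big]
      simp only [Bool.false_or]
      exact pv_bigst_none t
    have hrareB : (t.foldl pvStep (none, 0, 0, 0, false, false, false)).2.2.2.1 =
        (t.map (fun c => if "JQXZ".toList.contains c then (1 : Int) else 0)).sum := by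
      rw [pv_proj_rare]
      simp
    -- A-side triple loop
    have htripA : ((PySem.List.pyRange 0 ((t.length : Int) - 2) 1).any (fun i =>
         (PySem.List.pyGet? t i == PySem.List.pyGet? t (i + 1)) &&
         (PySem.List.pyGet? t (i + 1) == PySem.List.pyGet? t (i + 2)))) = pvTrip t := by
      rw [pv_any_pyRange_zero]
      have e : ((t.length : Int) - 2).toNat = t.length - 2 := by omega
      rw [e, ← pv_tripN t]
    rw [htripA, hne]
    simp only [Bool.false_or, h3, decide_false, Bool.false_eq_true, if_false]
    rw [htripB, hcluB, hbigB, hrareB]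
    by_cases htr : pvTrip t = true
    · simp [htr]
    · have htr' : pvTrip t = false := by simpa using htr
      simp only [htr', Bool.false_eq_true, if_false, Bool.false_or]
      have hsame : ((PySem.Set.ofList t).length == 1) = false := by
        by_cases h1 : (PySem.Set.ofList t).length = 1
        · exact absurd (pv_allsame t h3' h1) (by simp [htr'])
        · simp [h1]
      rw [hsame]
      simp only [Bool.false_eq_true, if_false]
      have hvset : PySem.Set.ofList "AEIOUY".toList = "AEIOUY".toList := by decide
      have hvow : (fun (st : Int × Int) c =>
          if !(PySem.Set.contains (PySem.Set.ofList "AEIOUY".toList) c)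
          then (st.1 + 1, max st.2 (st.1 + 1)) else ((0 : Int), st.2)) =
          (fun (st : Int × Int) c =>
          if pvCons c then (st.1 + 1, max st.2 (st.1 + 1)) else ((0 : Int), st.2)) := by
        funext st c
        rw [hvset]
        rfl
      rw [hvow]
      have hiff : (4 ≤ (t.foldl (fun (st : Int × Int) c =>
          if pvCons c then (st.1 + 1, max st.2 (st.1 + 1)) else ((0 : Int), st.2)) (0, 0)).2) ↔
          pvQuad t = true := by
        rw [pv_quad_run t 0 0 le_rfl le_rfl]
        constructor
        · rintro (h | h | h)
          · omega
          · exact pv_lead4_quad t (by omega)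
          · exact h
        · intro h
          exact Or.inr (Or.inr h)
      have hquadA : (decide (4 ≤ (t.foldl (fun (st : Int × Int) c =>
          if pvCons c then (st.1 + 1, max st.2 (st.1 + 1)) else ((0 : Int), st.2)) (0, 0)).2)) =
          pvQuad t := by
        cases hq : pvQuad t
        · simp [hiff, hq]
        · simp [hiff, hq]
      rw [hquadA]
      by_cases hq : pvQuad t = true
      · simp [hq]
      · have hq' : pvQuad t = false := by simpa using hq
        simp only [hq', Bool.false_eq_true, if_false]
        have h2len : decide (2 ≤ t.length) = true := by simp; omega
        rw [h2len, Bool.and_true]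
        cases strict
        · simp
        · simp only [if_true]
          have hslice : ∀ k : Nat, PySem.List.slice t (some (k : Int)) (some ((k : Int) + 2)) =
              (t.drop k).take 2 := by
            intro k
            have e2 : ((k : Int) + 2) = ((k + 2 : Nat) : Int) := by push_cast; ring
            rw [e2, PySem.List.slice_natCast]
            congr 1
            omega
          have hbigA : ((PySem.List.pyRange 0 ((t.length : Int) - 1) 1).any (fun i =>
              pvBigramsA.contains (PySem.List.slice t (some i) (some (i + 2))))) = pvBig t := by
            rw [pv_any_pyRange_zero]
            have e : ((t.length : Int) - 1).toNat = t.length - 1 := by omega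
            rw [e]
            rw [List.any_congr rfl (fun k => by rw [hslice k])]
            exact pv_bigN t
          rw [hbigA]
          by_cases hbg : pvBig t = true
          · simp [hbg]
          · have hbg' : pvBig t = false := by simpa using hbg
            simp only [hbg', Bool.false_eq_true, if_false, Bool.false_or]
            generalize decide (2 ≤ (t.map (fun c => if "JQXZ".toList.contains c then (1 : Int) else 0)).sum) = b1
            generalize decide (3 ≤ (t.map (fun c => if "JQXZ".toList.contains c then (1 : Int) else 0)).sum) = b3
            generalize decide (t.length ≤ 5) = b2
            cases b1 <;> cases b2 <;> cases b3 <;> rfl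

-- ===== VERDICT (by name: the statement is the Claim_ definition above) =====
theorem is_gibberish_pattern_spec : Claim_equal_is_gibberish_pattern := by
  intro pattern strict _
  unfold Spec_is_gibberish_pattern is_gibberish_pattern is_gibberish_pattern_alt
  exact pv_main ((PySem.Str.upper (PySem.Str.replace pattern "?" "")).toList) strict
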